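-- pv_equiv track=rewrite | github.com/AvocadosConstant/vax | dna.py | format_lsts_to_rows
-- ===== SOURCE A (Python) =====
-- def chunk_generator(lst, size):
--     """ Yield successive chunks of a given size from lst """
--     for i in range(0, len(lst), size):
--         yield lst[i:i + size]
--
-- def format_lsts_to_rows(lsts, chunk_size):
--     rows = []
--
--     chunked = [list(chunk_generator(lst, chunk_size)) for lst in lsts]
--
--     for lst_chunks in chunked:
--         for row_i, _ in enumerate(lst_chunks):
--             if len(rows) <= row_i:
--                 rows.append([])
--
--             rows[row_i].append(' '.join(lst_chunks[row_i]))
--     return rows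
-- ===== SOURCE B (Python) =====
-- def format_lsts_to_rows(lsts, chunk_size):
--     # Peel rows off the front: every iteration emits one complete output row
--     # (the next chunk of every still-unfinished list) and shrinks the worklist.
--     if chunk_size <= 0:
--         return []
--     rows = []
--     live = [lst for lst in lsts if lst]
--     while live:
--         rows.append([' '.join(lst[:chunk_size]) for lst in live])
--         live = [lst[chunk_size:] for lst in live if len(lst) > chunk_size]
--     return rows
-- ===== Notes on version B (the rewrite author's own statement) =====
-- stated objective: alternative
-- what changed: A chunks every list up front and transposes column-major, growing rows on demand; B never builds a chunk table: it peels one complete output row per iteration off a shrinking worklist of list remainders (emit the first chunk of every live list, then keep only the remainders longer than chunk_size).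
import Mathlib
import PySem

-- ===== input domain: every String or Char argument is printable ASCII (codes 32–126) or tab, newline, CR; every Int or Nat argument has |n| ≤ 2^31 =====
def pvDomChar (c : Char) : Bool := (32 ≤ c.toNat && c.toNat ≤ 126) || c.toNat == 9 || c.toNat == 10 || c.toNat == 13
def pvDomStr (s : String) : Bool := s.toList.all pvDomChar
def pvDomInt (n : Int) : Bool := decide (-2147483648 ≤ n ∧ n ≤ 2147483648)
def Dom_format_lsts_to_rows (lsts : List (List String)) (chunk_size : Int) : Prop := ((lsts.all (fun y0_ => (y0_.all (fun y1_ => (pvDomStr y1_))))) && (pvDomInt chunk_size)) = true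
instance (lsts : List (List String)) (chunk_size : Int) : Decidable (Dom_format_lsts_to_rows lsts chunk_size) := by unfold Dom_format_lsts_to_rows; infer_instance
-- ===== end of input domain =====

-- B replaces A's chunk-table-and-transpose (rows grown on demand, column-major) by a
-- worklist peel: each while-iteration emits one complete output row and shrinks the
-- worklist of list remainders (objective: alternative decomposition, same cost).

-- ===== PORT A =====
-- list(chunk_generator(lst, size)): the generator fully consumed — the list of slices
-- lst[i:i+size] for i in range(0, len(lst), size)
def chunk_generator (lst : List String) (size : Int) : List (List String) :=
  (PySem.List.pyRange 0 (lst.length : Int) size).map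
    (fun i => PySem.List.slice lst (some i) (some (i + size)))

def format_lsts_to_rows (lsts : List (List String)) (chunk_size : Int) : List (List String) :=
  let chunked := lsts.map (fun lst => chunk_generator lst chunk_size)
  chunked.foldl (fun rows lst_chunks =>
    (PySem.List.enumerate lst_chunks).foldl (fun rows p =>
      let rows := if (rows.length : Int) ≤ p.1 then rows ++ [[]] else rows
      PySem.List.pySetD rows p.1
        (PySem.List.pyGetD rows p.1 [] ++
          [PySem.Str.join " " (PySem.List.pyGetD lst_chunks p.1 [])])) rows) []

-- ===== PORT B =====
-- the two comprehensions of the while-body, named so the loop can recurse on them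
def altRow (chunk_size : Int) (live : List (List String)) : List String :=
  live.map (fun lst => PySem.Str.join " " (PySem.List.slice lst none (some chunk_size)))

def altNext (chunk_size : Int) (live : List (List String)) : List (List String) :=
  (live.filter (fun l => decide (chunk_size < (l.length : Int)))).map
    (fun l => PySem.List.slice l (some chunk_size) none)

-- measure fact the while-loop's recursion cites: the next worklist is strictly smaller
theorem altLoop_measure (chunk_size : Int) (hcs : 0 < chunk_size)
    (live : List (List String)) (hne : ¬ live.isEmpty = true) :
    ((altNext chunk_size live).map List.length).sum + (altNext chunk_size live).length
      < ((live.map List.length).sum + live.length) := by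
  have key : ∀ (xs : List (List String)),
      ((altNext chunk_size xs).map List.length).sum + (altNext chunk_size xs).length
        ≤ (xs.map List.length).sum := by
    intro xs
    induction xs with
    | nil => simp [altNext]
    | cons l rest ih =>
        by_cases hl : chunk_size < (l.length : Int)
        · have h1 : 1 ≤ chunk_size.toNat := by omega
          have h2 : (PySem.List.slice l (some chunk_size) none).length
              = l.length - chunk_size.toNat := by
            rw [PySem.List.slice_from l hcs.le]; simp
          have h3 : chunk_size.toNat < l.length := by omega
          simp only [altNext, List.filter_cons, hl, decide_true, if_true, List.map_cons,
            List.sum_cons, List.length_cons] at ih ⊢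
          omega
        · simp only [altNext, List.filter_cons, hl, decide_false, Bool.false_eq_true, if_false,
            List.map_cons, List.sum_cons] at ih ⊢
          omega
  have hlen : 1 ≤ live.length := by
    cases live with
    | nil => simp at hne
    | cons a b => simp
  have := key live
  omega

-- while live: rows.append(row); live = next   — tail recursion carrying rows
def format_lsts_to_rows_altLoop (chunk_size : Int) (hcs : 0 < chunk_size)
    (rows : List (List String)) (live : List (List String)) : List (List String) :=
  if _h : live.isEmpty then rows
  else
    format_lsts_to_rows_altLoop chunk_size hcs
      (rows ++ [altRow chunk_size live]) (altNext chunk_size live)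
termination_by (live.map List.length).sum + live.length
decreasing_by exact altLoop_measure chunk_size hcs live _h

def format_lsts_to_rows_alt (lsts : List (List String)) (chunk_size : Int) : List (List String) :=
  if h : 0 < chunk_size then
    format_lsts_to_rows_altLoop chunk_size h [] (lsts.filter (fun l => !l.isEmpty))
  else []

-- ===== PRECONDITION & SPEC =====
-- Pre_ excludes exactly the inputs where Python A raises ValueError: chunk_size = 0 with at
-- least one list present (range(0, n, 0) is illegal).
def Pre_format_lsts_to_rows (lsts : List (List String)) (chunk_size : Int) : Prop :=
  chunk_size ≠ 0 ∨ lsts = []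
instance (lsts : List (List String)) (chunk_size : Int) : Decidable (Pre_format_lsts_to_rows lsts chunk_size) := by unfold Pre_format_lsts_to_rows; infer_instance

def pvWitness_format_lsts_to_rows : List (List String) × Int := ([["a", "b", "c"], ["d"]], 2)

def Spec_format_lsts_to_rows (lsts : List (List String)) (chunk_size : Int) (out : List (List String)) : Prop := out = format_lsts_to_rows_alt lsts chunk_size
instance (lsts : List (List String)) (chunk_size : Int) (out : List (List String)) : Decidable (Spec_format_lsts_to_rows lsts chunk_size out) := by unfold Spec_format_lsts_to_rows; infer_instance

-- ===== CLAIM (what is proved, stated in full; the proofs are below) =====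
def Claim_equal_format_lsts_to_rows : Prop := ∀ (lsts : List (List String)) (chunk_size : Int), Dom_format_lsts_to_rows lsts chunk_size → Pre_format_lsts_to_rows lsts chunk_size → Spec_format_lsts_to_rows lsts chunk_size (format_lsts_to_rows lsts chunk_size)

-- ===== LEMMAS AND PROOFS =====

-- ---- A side: the fold is repeated column-extension (zipExt), which is a transpose ----

-- zipExt rows cs: append cs's entries one-per-row to rows, growing rows as needed;
-- this is what A's inner loop does to the accumulated rows for one list's chunk column.
def zipExt : List (List String) → List String → List (List String)
  | rows, [] => rows
  | [], c :: cs => [c] :: zipExt [] cs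
  | r :: rs, c :: cs => (r ++ [c]) :: zipExt rs cs

theorem getElem?_zipExt (rows : List (List String)) (cs : List String) (i : Nat) :
    (zipExt rows cs)[i]? =
      match (rows)[i]?, (cs)[i]? with
      | some r, some c => some (r ++ [c])
      | some r, none => some r
      | none, some c => some [c]
      | none, none => none := by
  induction rows, cs using zipExt.induct generalizing i with
  | case1 rows => cases h : (rows)[i]? <;> simp [zipExt, h]
  | case2 c cs ih =>
      cases i with
      | zero => simp [zipExt]
      | succ j => simpa [zipExt] using ih j
  | case3 r rs c cs ih =>
      cases i with
      | zero => simp [zipExt]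
      | succ j => simpa [zipExt] using ih j

-- A's inner-loop body for one enumerated chunk (proof-side name for the port's lambda)
def bodyA (lst_chunks : List (List String)) (rows : List (List String)) (p : Int × List String) : List (List String) :=
  let rows := if (rows.length : Int) ≤ p.1 then rows ++ [[]] else rows
  PySem.List.pySetD rows p.1
    (PySem.List.pyGetD rows p.1 [] ++
      [PySem.Str.join " " (PySem.List.pyGetD lst_chunks p.1 [])])

-- A's inner loop over enumerate, started at row index s with s ≤ rows.length, is zipExt
-- on the tail of rows (chunks joined with " ").
theorem innerA (lst_chunks : List (List String)) :
    ∀ (cs : List (List String)) (s : Nat) (rows : List (List String)),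
      s ≤ rows.length → lst_chunks.drop s = cs →
      (PySem.List.enumerate cs (s : Int)).foldl (bodyA lst_chunks) rows
        = rows.take s ++ zipExt (rows.drop s) (cs.map (PySem.Str.join " ")) := by
  intro cs
  induction cs with
  | nil =>
      intro s rows hs _
      simp [PySem.List.enumerate, zipExt, List.take_append_drop]
  | cons c cs ih =>
      intro s rows hs hdrop
      have hgets : lst_chunks[s]? = some c := by
        have h0 : (lst_chunks.drop s)[0]? = some c := by rw [hdrop]; rfl
        simpa [List.getElem?_drop] using h0
      have hdrop' : lst_chunks.drop (s + 1) = cs := by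
        have h1 : (lst_chunks.drop s).drop 1 = lst_chunks.drop (s + 1) := by
          simp [List.drop_drop]
        simpa [hdrop] using h1.symm
      rw [PySem.List.enumerate_cons, List.foldl_cons]
      have hjoin : PySem.List.pyGetD lst_chunks ((s : Nat) : Int) [] = c := by
        simp [PySem.List.pyGetD_natCast, List.getD, hgets]
      have hcast : ((s : Nat) : Int) + 1 = (((s + 1 : Nat)) : Int) := by push_cast; ring
      by_cases hlen : rows.length = s
      · -- the row does not exist yet: append [] then set rows[s] := [join c]
        have hstep : bodyA lst_chunks rows (((s : Nat) : Int), c)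
            = rows ++ [[PySem.Str.join " " c]] := by
          unfold bodyA
          have hcond : ((rows.length : Int) ≤ ((s : Nat) : Int)) := by exact_mod_cast hlen.le
          simp only [if_pos hcond]
          have hget1 : PySem.List.pyGetD (rows ++ [[]]) ((s : Nat) : Int) [] = [] := by
            simp [PySem.List.pyGetD_natCast, List.getD, ← hlen]
          rw [hjoin, hget1, PySem.List.pySetD_natCast,
            List.set_eq_take_cons_drop _ (by simp [hlen] : s < (rows ++ [([] : List String)]).length)]
          simp [← hlen]
        rw [hstep, hcast, ih (s + 1) (rows ++ [[PySem.Str.join " " c]]) (by simp [hlen]) hdrop']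
        rw [List.take_of_length_le (by simp [hlen]), List.drop_of_length_le (by simp [hlen]),
          List.take_of_length_le hlen.le, List.drop_of_length_le hlen.le]
        simp [zipExt]
      · -- the row already exists: set rows[s] := rows[s] ++ [join c]
        have hslt : s < rows.length := by omega
        have hstep : bodyA lst_chunks rows (((s : Nat) : Int), c)
            = rows.set s (rows[s] ++ [PySem.Str.join " " c]) := by
          unfold bodyA
          have hcond : ¬ ((rows.length : Int) ≤ ((s : Nat) : Int)) := by
            simp only [not_le]; exact_mod_cast hslt
          simp only [if_neg hcond]
          have hget1 : PySem.List.pyGetD rows ((s : Nat) : Int) [] = rows[s] := by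
            simp [PySem.List.pyGetD_natCast, List.getD, List.getElem?_eq_getElem hslt]
          rw [hjoin, hget1, PySem.List.pySetD_natCast]
        rw [hstep, hcast, ih (s + 1) (rows.set s (rows[s] ++ [PySem.Str.join " " c]))
          (by simp; omega) hdrop']
        rw [List.set_eq_take_cons_drop _ hslt, List.drop_eq_getElem_cons hslt]
        rw [List.take_append, List.drop_append]
        have hlt : (List.take s rows).length = s := by simp [Nat.min_eq_left hs]
        simp [hlt, List.take_take,
          List.drop_of_length_le (hlt.le.trans (Nat.le_succ s))]
        rw [List.drop_eq_getElem_cons hslt]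
        simp [zipExt]

-- the common abstract shape both programs compute: the row-major transpose of a ragged table
def depthJ (J : List (List String)) : Nat := J.foldl (fun acc c => max acc c.length) 0

def tshape (J : List (List String)) : List (List String) :=
  (List.range (depthJ J)).map (fun i => J.filterMap (fun c => (c)[i]?))

-- the transpose form of repeated zipExt
theorem transpose_eq (J : List (List String)) : J.foldl zipExt [] = tshape J := by
  unfold tshape depthJ
  induction J using List.reverseRecOn with
  | nil => simp
  | append_singleton J cs ih =>
      rw [List.foldl_append, ih, List.foldl_cons, List.foldl_nil, List.foldl_append,
        List.foldl_cons, List.foldl_nil]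
      have hmax := (PySem.List.le_foldl_max_nat J List.length 0).2
      have hrow : ∀ i : Nat, J.foldl (fun acc c => max acc c.length) 0 ≤ i →
          J.filterMap (fun c => (c)[i]?) = [] := by
        intro i hi
        rw [List.filterMap_eq_nil_iff]
        intro c hc
        exact List.getElem?_eq_none (le_trans (hmax c hc) hi)
      apply List.ext_getElem?
      intro i
      rw [getElem?_zipExt]
      by_cases hJ : i < J.foldl (fun acc c => max acc c.length) 0 <;>
        by_cases hc : i < cs.length
      · simp [hJ, hc, List.filterMap_append]
      · simp [hJ, List.filterMap_append, List.getElem?_eq_none (Nat.le_of_not_lt hc)]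
      · simp [hJ, hc, List.filterMap_append, hrow i (Nat.le_of_not_lt hJ)]
      · simp [hJ, hc]

-- ---- the joined-chunk column of one list, as a recursion (shared characterization) ----

def chunksRec (cs : Int) : List String → List String
  | [] => []
  | x :: xs =>
      if _h : cs ≤ 0 then []
      else PySem.Str.join " " ((x :: xs).take cs.toNat)
            :: chunksRec cs ((x :: xs).drop cs.toNat)
termination_by l => l.length
decreasing_by simp; omega

theorem pyRange_pos_nil (a b cs : Int) (hcs : 0 < cs) (h : b ≤ a) :
    PySem.List.pyRange a b cs = [] := by
  rw [PySem.List.pyRange_of_pos a b hcs]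
  simp [not_lt.mpr h]

theorem pyRange_neg_nil (n cs : Int) (hcs : cs < 0) (hn : 0 ≤ n) :
    PySem.List.pyRange 0 n cs = [] := by
  simp only [PySem.List.pyRange]
  rw [if_neg hcs.ne, if_neg (by omega : ¬ (0 : Int) < cs), if_neg (by omega : ¬ n < 0)]
  simp

theorem pyRange_pos_cons (a b cs : Int) (hcs : 0 < cs) (hab : a < b) :
    PySem.List.pyRange a b cs = a :: PySem.List.pyRange (a + cs) b cs := by
  rw [PySem.List.pyRange_of_pos a b hcs, PySem.List.pyRange_of_pos (a + cs) b hcs,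
    if_pos hab]
  have hx : (0 : Int) ≤ b - a - 1 := by omega
  have hdiv : (b - a + cs - 1) / cs = (b - a - 1) / cs + 1 := by
    have he : b - a + cs - 1 = (b - a - 1) + 1 * cs := by ring
    rw [he, Int.add_mul_ediv_right _ _ hcs.ne']
  have hnn : 0 ≤ (b - a - 1) / cs := Int.ediv_nonneg hx hcs.le
  by_cases h2 : a + cs < b
  · rw [if_pos h2]
    have he : b - (a + cs) + cs - 1 = b - a - 1 := by ring
    have hc : ((b - a + cs - 1) / cs).toNat = ((b - a - 1) / cs).toNat + 1 := by
      rw [hdiv]; omega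
    rw [he, hc, List.range_succ_eq_map, List.map_cons, List.map_map]
    refine congrArg₂ _ (by ring) (List.map_congr_left ?_)
    intro k _
    simp only [Function.comp_apply, Nat.succ_eq_add_one]
    push_cast
    ring
  · rw [if_neg h2]
    have h0 : (b - a - 1) / cs = 0 := Int.ediv_eq_zero_of_lt hx (by omega)
    have hc : ((b - a + cs - 1) / cs).toNat = 1 := by rw [hdiv, h0]; rfl
    rw [hc]
    simp [List.range_succ]

theorem pyRange_pos_shift (b cs : Int) (hcs : 0 < cs) :
    PySem.List.pyRange cs b cs = (PySem.List.pyRange 0 (b - cs) cs).map (fun x => x + cs) := by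
  rw [PySem.List.pyRange_of_pos cs b hcs, PySem.List.pyRange_of_pos 0 (b - cs) hcs,
    List.map_map]
  have hc : (if cs < b then ((b - cs + cs - 1) / cs).toNat else 0)
      = (if 0 < b - cs then ((b - cs - 0 + cs - 1) / cs).toNat else 0) := by
    have he : b - cs + cs - 1 = b - cs - 0 + cs - 1 := by ring
    rw [he]
    exact if_congr (by omega) rfl rfl
  rw [hc]
  exact List.map_congr_left (fun k _ => by simp only [Function.comp_apply]; ring)

theorem chunksRec_nonpos (cs : Int) (h : cs ≤ 0) (l : List String) : chunksRec cs l = [] := by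
  cases l with
  | nil => simp [chunksRec]
  | cons x xs => rw [chunksRec, dif_pos h]

theorem chunksRec_cons (cs : Int) (hcs : 0 < cs) (l : List String) (hl : l ≠ []) :
    chunksRec cs l
      = PySem.Str.join " " (l.take cs.toNat) :: chunksRec cs (l.drop cs.toNat) := by
  cases l with
  | nil => exact absurd rfl hl
  | cons x xs => rw [chunksRec, dif_neg (by omega)]

-- A's pyRange/slice chunk column equals the recursion, for every chunk_size
theorem chunkJoin_eq (cs : Int) (lst : List String) :
    (PySem.List.pyRange 0 (lst.length : Int) cs).map
        (fun i => PySem.Str.join " " (PySem.List.slice lst (some i) (some (i + cs))))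
      = chunksRec cs lst := by
  rcases lt_trichotomy cs 0 with hneg | hz | hpos
  · rw [pyRange_neg_nil _ _ hneg (by exact_mod_cast Nat.zero_le _),
      chunksRec_nonpos cs hneg.le]
    rfl
  · subst hz
    rw [chunksRec_nonpos 0 le_rfl]
    simp [PySem.List.pyRange]
  · -- positive chunk_size: strong induction on the list length
    suffices h : ∀ (n : Nat) (l : List String), l.length ≤ n →
        (PySem.List.pyRange 0 (l.length : Int) cs).map
            (fun i => PySem.Str.join " " (PySem.List.slice l (some i) (some (i + cs))))
          = chunksRec cs l by
      exact h lst.length lst le_rfl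
    intro n
    induction n with
    | zero =>
        intro l hl
        have : l = [] := List.eq_nil_of_length_eq_zero (Nat.le_zero.mp hl)
        subst this
        simp only [List.length_nil, Nat.cast_zero]
        rw [pyRange_pos_nil 0 0 cs hpos le_rfl]
        simp [chunksRec]
    | succ n ih =>
        intro l hl
        cases l with
        | nil =>
            rw [pyRange_pos_nil _ _ _ hpos (by simp)]
            simp [chunksRec]
        | cons x xs =>
            have hm : (0 : Int) < ((x :: xs).length : Int) := by
              simp
            rw [pyRange_pos_cons 0 _ cs hpos hm, List.map_cons, zero_add,
              chunksRec_cons cs hpos _ (by simp)]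
            congr 1
            · -- the head chunk: lst[0:cs] is take cs
              rw [PySem.List.slice_zero_start, PySem.List.slice_to _ hpos.le]
            · -- the tail: shift the range and recurse on the dropped list
              rw [pyRange_pos_shift _ cs hpos, List.map_map]
              have hlen' : PySem.List.pyRange 0 (((x :: xs).length : Int) - cs) cs
                  = PySem.List.pyRange 0 ((((x :: xs).drop cs.toNat).length : Int)) cs := by
                by_cases hc : cs ≤ ((x :: xs).length : Int)
                · congr 1
                  simp only [List.length_drop]
                  omega
                · rw [pyRange_pos_nil _ _ _ hpos (by omega),
                    pyRange_pos_nil _ _ _ hpos (by simp only [List.length_drop]; omega)]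
              rw [hlen', ← ih ((x :: xs).drop cs.toNat)
                (by simp only [List.length_drop]; omega)]
              apply List.map_congr_left
              intro i hi
              have hi0 : 0 ≤ i := by
                have := (PySem.List.mem_pyRange_iff_of_pos hpos i).mp hi
                exact this.1
              simp only [Function.comp_apply]
              congr 1
              rw [PySem.List.slice_toNat _ (by omega) (by omega),
                PySem.List.slice_toNat _ (by omega) (by omega), List.drop_drop]
              have e1 : (i + cs).toNat = cs.toNat + i.toNat := by omega
              rw [e1]
              have e2 : (i + cs + cs).toNat - (cs.toNat + i.toNat)
                  = cs.toNat + i.toNat - i.toNat := by omega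
              rw [e2]

-- ---- facts about chunksRec and tshape driving B's peel ----

theorem foldl_max_init (J : List (List String)) :
    ∀ a : Nat, J.foldl (fun acc c => max acc c.length) a
      = max a (J.foldl (fun acc c => max acc c.length) 0) := by
  induction J with
  | nil => intro a; simp
  | cons c J ih =>
      intro a
      rw [List.foldl_cons, List.foldl_cons, ih (max a c.length), ih (max 0 c.length)]
      omega

theorem depthJ_cons (c : List String) (J : List (List String)) :
    depthJ (c :: J) = max c.length (depthJ J) := by
  unfold depthJ
  rw [List.foldl_cons, foldl_max_init]
  omega

theorem tshape_nil_cols (J : List (List String)) (h : ∀ c ∈ J, c = []) : tshape J = [] := by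
  have hd : depthJ J = 0 := by
    induction J with
    | nil => rfl
    | cons c J ih =>
        rw [depthJ_cons, h c List.mem_cons_self, ih (fun c hc => h c (List.mem_cons_of_mem _ hc))]
        rfl
  unfold tshape
  rw [hd]
  rfl

theorem depthJ_filter (J : List (List String)) :
    depthJ J = depthJ (J.filter (fun c => !c.isEmpty)) := by
  induction J with
  | nil => rfl
  | cons c J ih =>
      cases c with
      | nil => simpa [depthJ_cons] using ih
      | cons x xs =>
          rw [depthJ_cons, List.filter_cons]
          simp only [List.isEmpty_cons, Bool.not_false, if_true]
          rw [depthJ_cons, ih]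

theorem filterMap_filter_empty (J : List (List String)) (i : Nat) :
    J.filterMap (fun c => (c)[i]?)
      = (J.filter (fun c => !c.isEmpty)).filterMap (fun c => (c)[i]?) := by
  induction J with
  | nil => rfl
  | cons c J ih =>
      cases c with
      | nil => simpa using ih
      | cons x xs =>
          rw [List.filterMap_cons, List.filter_cons]
          simp only [List.isEmpty_cons, Bool.not_false, if_true]
          rw [List.filterMap_cons]
          cases h : (x :: xs)[i]? <;> simp [ih]

theorem tshape_filter_empty (J : List (List String)) :
    tshape J = tshape (J.filter (fun c => !c.isEmpty)) := by
  unfold tshape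
  rw [← depthJ_filter]
  exact List.map_congr_left (fun i _ => filterMap_filter_empty J i)

-- dropping empty input lists changes nothing: their chunk column is empty
theorem tshape_filter (cs : Int) (hcs : 0 < cs) (lsts : List (List String)) :
    tshape (lsts.map (chunksRec cs))
      = tshape ((lsts.filter (fun l => !l.isEmpty)).map (chunksRec cs)) := by
  rw [tshape_filter_empty (lsts.map (chunksRec cs)), List.filter_map]
  congr 2
  apply List.filter_congr
  intro l _
  cases l with
  | nil => simp [chunksRec]
  | cons x xs =>
      simp only [Function.comp_apply]
      rw [chunksRec_cons cs hcs (x :: xs) (by simp)]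
      simp

-- the number of output rows drops by one per peel
theorem depth_step (cs : Int) (hcs : 0 < cs) :
    ∀ live : List (List String), (∀ l ∈ live, l ≠ []) →
      depthJ (live.map (chunksRec cs))
        = depthJ (((live.filter (fun l => decide (cs < (l.length : Int)))).map
              (fun l => l.drop cs.toNat)).map (chunksRec cs))
          + (if live = [] then 0 else 1) := by
  intro live
  induction live with
  | nil => intro _; simp [depthJ]
  | cons l rest ih =>
      intro hall
      have hl : l ≠ [] := hall l List.mem_cons_self
      have hrest := fun x hx => hall x (List.mem_cons_of_mem _ hx)
      rw [List.map_cons, depthJ_cons, chunksRec_cons cs hcs l hl, List.length_cons,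
        ih hrest, if_neg (List.cons_ne_nil l rest)]
      by_cases hp : cs < (l.length : Int)
      · simp only [List.filter_cons, hp, decide_true, if_true, List.map_cons, depthJ_cons]
        by_cases hr : rest = []
        · subst hr; simp [depthJ]
        · rw [if_neg hr]; omega
      · have hdrop : l.drop cs.toNat = [] := by
          rw [List.drop_eq_nil_iff]; omega
        have hz : (chunksRec cs (l.drop cs.toNat)).length = 0 := by
          rw [hdrop]; simp [chunksRec]
        simp only [List.filter_cons, hp, decide_false, Bool.false_eq_true, if_false]
        by_cases hr : rest = []
        · subst hr; simp [depthJ, hz]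
        · rw [if_neg hr]; omega

-- row 0 of the peel: the first chunk of every live list
theorem row_step (cs : Int) (hcs : 0 < cs) :
    ∀ live : List (List String), (∀ l ∈ live, l ≠ []) →
      (live.map (chunksRec cs)).filterMap (fun c => (c)[0]?)
        = live.map (fun l => PySem.Str.join " " (l.take cs.toNat)) := by
  intro live
  induction live with
  | nil => intro _; rfl
  | cons l rest ih =>
      intro hall
      rw [List.map_cons, List.filterMap_cons,
        chunksRec_cons cs hcs l (hall l List.mem_cons_self)]
      simp only [List.getElem?_cons_zero]
      rw [ih (fun x hx => hall x (List.mem_cons_of_mem _ hx)), List.map_cons]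

-- rows 1.. of the peel: the transpose of the chunk columns of the remainders
theorem succ_step (cs : Int) (hcs : 0 < cs) :
    ∀ live : List (List String), (∀ l ∈ live, l ≠ []) → ∀ i : Nat,
      (live.map (chunksRec cs)).filterMap (fun c => (c)[i + 1]?)
        = (((live.filter (fun l => decide (cs < (l.length : Int)))).map
            (fun l => l.drop cs.toNat)).map (chunksRec cs)).filterMap (fun c => (c)[i]?) := by
  intro live
  induction live with
  | nil => intro _ _; rfl
  | cons l rest ih =>
      intro hall i
      have hrest := fun x hx => hall x (List.mem_cons_of_mem _ hx)
      rw [List.map_cons, List.filterMap_cons,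
        chunksRec_cons cs hcs l (hall l List.mem_cons_self)]
      simp only [List.getElem?_cons_succ]
      by_cases hp : cs < (l.length : Int)
      · simp only [List.filter_cons, hp, decide_true, if_true, List.map_cons,
          List.filterMap_cons]
        cases h : (chunksRec cs (l.drop cs.toNat))[i]? <;> simp [ih hrest i]
      · have hdrop : l.drop cs.toNat = [] := by
          rw [List.drop_eq_nil_iff]; omega
        have hz : (chunksRec cs (l.drop cs.toNat))[i]? = none := by
          rw [hdrop]; simp [chunksRec]
        simp only [List.filter_cons, hp, decide_false, Bool.false_eq_true, if_false, hz]
        exact ih hrest i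

-- one peel step of the transpose shape
theorem tshape_step (cs : Int) (hcs : 0 < cs) (live : List (List String))
    (hne : live ≠ []) (hall : ∀ l ∈ live, l ≠ []) :
    tshape (live.map (chunksRec cs))
      = (live.map (fun l => PySem.Str.join " " (l.take cs.toNat)))
        :: tshape (((live.filter (fun l => decide (cs < (l.length : Int)))).map
              (fun l => l.drop cs.toNat)).map (chunksRec cs)) := by
  have hd := depth_step cs hcs live hall
  rw [if_neg hne] at hd
  unfold tshape
  rw [hd, List.range_succ_eq_map, List.map_cons]
  congr 1
  · exact row_step cs hcs live hall
  · rw [List.map_map]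
    apply List.map_congr_left
    intro i _
    simp only [Function.comp_apply, Nat.succ_eq_add_one]
    exact succ_step cs hcs live hall i

-- B's loop computes the transpose shape of the chunk columns of its worklist
theorem altLoop_eq (cs : Int) (hcs : 0 < cs) :
    ∀ (live rows : List (List String)), (∀ l ∈ live, l ≠ []) →
      format_lsts_to_rows_altLoop cs hcs rows live
        = rows ++ tshape (live.map (chunksRec cs)) := by
  intro live rows
  induction rows, live using format_lsts_to_rows_altLoop.induct cs hcs with
  | case1 rows live h =>
      intro _
      rw [format_lsts_to_rows_altLoop, dif_pos h]
      rw [List.isEmpty_iff.mp h]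
      simp [tshape, depthJ]
  | case2 rows live h ih =>
      intro hall
      have hne : live ≠ [] := by
        intro hcon; rw [hcon] at h; exact h rfl
      have hallnext : ∀ l ∈ altNext cs live, l ≠ [] := by
        intro l hlmem
        unfold altNext at hlmem
        rcases List.mem_map.mp hlmem with ⟨l', hl', rfl⟩
        have hp : cs < (l'.length : Int) := by
          have := List.of_mem_filter hl'
          exact of_decide_eq_true this
        rw [PySem.List.slice_from l' hcs.le]
        intro hcon
        rw [List.drop_eq_nil_iff] at hcon
        omega
      rw [format_lsts_to_rows_altLoop, dif_neg h, ih hallnext]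
      have hrow : altRow cs live = live.map (fun l => PySem.Str.join " " (l.take cs.toNat)) := by
        unfold altRow
        exact List.map_congr_left (fun l _ => by rw [PySem.List.slice_to l hcs.le])
      have hnext : altNext cs live
          = (live.filter (fun l => decide (cs < (l.length : Int)))).map
              (fun l => l.drop cs.toNat) := by
        unfold altNext
        exact List.map_congr_left (fun l _ => by rw [PySem.List.slice_from l hcs.le])
      rw [hrow, hnext, tshape_step cs hcs live hne hall, List.append_assoc,
        List.singleton_append]

-- assembling: both ports compute tshape (lsts.map (chunksRec chunk_size))
theorem ports_agree (lsts : List (List String)) (chunk_size : Int) :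
    format_lsts_to_rows lsts chunk_size = format_lsts_to_rows_alt lsts chunk_size := by
  -- A computes the transpose shape of the chunk columns …
  have hinner : ∀ (cs : List (List String)) (rows : List (List String)),
      (PySem.List.enumerate cs).foldl (bodyA cs) rows
        = zipExt rows (cs.map (PySem.Str.join " ")) := by
    intro cs rows
    have h := innerA cs cs 0 rows (Nat.zero_le _) (by simp)
    simpa using h
  have hfun : (fun (rows : List (List String)) (cs : List (List String)) =>
        (PySem.List.enumerate cs).foldl (bodyA cs) rows)
      = (fun rows cs => zipExt rows (cs.map (PySem.Str.join " "))) :=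
    funext fun rows => funext fun cs => hinner cs rows
  have hA : format_lsts_to_rows lsts chunk_size
      = tshape (lsts.map (chunksRec chunk_size)) := by
    rw [show format_lsts_to_rows lsts chunk_size
        = (lsts.map (fun lst => chunk_generator lst chunk_size)).foldl
            (fun rows cs => (PySem.List.enumerate cs).foldl (bodyA cs) rows) [] from rfl]
    rw [hfun, ← List.foldl_map, List.map_map]
    have hcols : (lsts.map ((fun cs => cs.map (PySem.Str.join " "))
          ∘ fun lst => chunk_generator lst chunk_size))
        = lsts.map (chunksRec chunk_size) := by
      apply List.map_congr_left
      intro lst _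
      simp only [Function.comp_apply, chunk_generator, List.map_map]
      exact chunkJoin_eq chunk_size lst
    rw [hcols, transpose_eq]
  rw [hA]
  -- … and so does B
  unfold format_lsts_to_rows_alt
  split_ifs with h
  · have hall : ∀ l ∈ lsts.filter (fun l => !l.isEmpty), l ≠ [] := by
      intro l hlmem
      have := List.of_mem_filter hlmem
      simpa using this
    rw [altLoop_eq chunk_size h (lsts.filter (fun l => !l.isEmpty)) [] hall,
      List.nil_append, ← tshape_filter chunk_size h lsts]
  · exact tshape_nil_cols _ (by
      intro c hc
      rcases List.mem_map.mp hc with ⟨l, _, rfl⟩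
      exact chunksRec_nonpos chunk_size (by omega) l)

-- ===== VERDICT (final) =====
theorem format_lsts_to_rows_spec : Claim_equal_format_lsts_to_rows := by
  intro lsts chunk_size _ _
  unfold Spec_format_lsts_to_rows
  exact ports_agree lsts chunk_size
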